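-- pv_equiv track=rewrite | github.com/Algos-ICT/lab-2_1-nikita-kuznetsov | task11.py | find_max_weight
-- ===== SOURCE A (Python) =====
-- def find_max_weight(capacity: int, ingots: list[int], max_weight: int = 0) -> int:
--     # if all ingots processed return max_weight
--     if not ingots:
--         return max_weight
--
--     # finding heaviest ingot and check if it fits
--     heaviest = max(ingots)
--     if max_weight + heaviest <= capacity:
--         max_weight += heaviest
--
--     # removing heaviest anyway and processing other ingots
--     ingots.remove(heaviest)
--     return find_max_weight(capacity, ingots, max_weight)
-- ===== SOURCE B (Python) =====
-- def find_max_weight(capacity: int, ingots: list[int], max_weight: int = 0) -> int: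
--     # Sort descending once, then a single greedy accumulating pass.
--     # (Return-value equivalent to A; unlike A, does not mutate `ingots`.)
--     total = max_weight
--     for w in sorted(ingots, reverse=True):
--         if total + w <= capacity:
--             total += w
--     return total
-- ===== Notes on version B (the rewrite author's own statement) =====
-- stated objective: faster
-- what changed: Replaces the recursive repeated max()+list.remove() scan (quadratic) with one descending sort followed by a single greedy accumulation pass; B also does not mutate the caller's list, which A empties.
import Mathlib
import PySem

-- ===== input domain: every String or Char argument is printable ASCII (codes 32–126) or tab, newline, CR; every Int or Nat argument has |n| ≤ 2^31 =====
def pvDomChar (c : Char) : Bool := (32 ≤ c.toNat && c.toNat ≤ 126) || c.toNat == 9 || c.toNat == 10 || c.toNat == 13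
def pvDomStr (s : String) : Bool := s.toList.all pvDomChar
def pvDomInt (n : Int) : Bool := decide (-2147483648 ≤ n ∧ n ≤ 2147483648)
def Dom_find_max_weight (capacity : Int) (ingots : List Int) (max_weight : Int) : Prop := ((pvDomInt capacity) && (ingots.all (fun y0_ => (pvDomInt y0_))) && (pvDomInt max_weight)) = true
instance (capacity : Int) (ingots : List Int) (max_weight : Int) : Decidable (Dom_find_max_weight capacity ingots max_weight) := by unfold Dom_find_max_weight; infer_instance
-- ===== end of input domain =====

-- B replaces A's recursive repeated max()+remove() scans with one descending sort and a
-- single greedy pass (objective: faster). Return-value equivalence only: Python A empties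
-- the caller's `ingots` list in place, B leaves it untouched.

-- ===== PORT A =====
-- termination helper: list.remove shortens the list by one
theorem pvRemove_len {xs r : List Int} {v : Int}
    (h : PySem.List.remove? xs v = some r) : r.length + 1 = xs.length := by
  induction xs generalizing r with
  | nil => simp [PySem.List.remove?] at h
  | cons x t ih =>
    by_cases hx : x = v
    · subst hx; simp [PySem.List.remove?_cons_self] at h; subst h; rfl
    · rw [PySem.List.remove?_cons_of_ne t hx] at h
      cases ht : PySem.List.remove? t v with
      | none => rw [ht] at h; simp at h
      | some r' =>
        rw [ht] at h; simp at h; subst h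
        simpa using ih ht

def find_max_weight (capacity : Int) (ingots : List Int) (max_weight : Int) : Int :=
  match PySem.List.max? ingots (fun v => v) with
  | none => max_weight                        -- "if not ingots: return max_weight"
  | some heaviest =>
    let mw := if max_weight + heaviest ≤ capacity then max_weight + heaviest else max_weight
    match hr : PySem.List.remove? ingots heaviest with
    | none => mw                              -- unreachable: heaviest ∈ ingots
    | some rest => find_max_weight capacity rest mw
termination_by ingots.length
decreasing_by
  have := pvRemove_len hr
  omega

-- ===== PORT B =====
def find_max_weight_alt (capacity : Int) (ingots : List Int) (max_weight : Int) : Int :=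
  (PySem.List.sorted ingots (fun v => v) true).foldl
    (fun total w => if total + w ≤ capacity then total + w else total) max_weight

-- ===== PRECONDITION & SPEC =====
def Spec_find_max_weight (capacity : Int) (ingots : List Int) (max_weight : Int) (out : Int) : Prop := out = find_max_weight_alt capacity ingots max_weight
instance (capacity : Int) (ingots : List Int) (max_weight : Int) (out : Int) : Decidable (Spec_find_max_weight capacity ingots max_weight out) := by unfold Spec_find_max_weight; infer_instance

-- ===== CLAIM (what is proved, stated in full; the proofs are below) =====
def Claim_equal_find_max_weight : Prop := ∀ (capacity : Int) (ingots : List Int) (max_weight : Int), Dom_find_max_weight capacity ingots max_weight → Spec_find_max_weight capacity ingots max_weight (find_max_weight capacity ingots max_weight)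

-- ===== LEMMAS AND PROOFS =====

-- the descending sort of a nonempty list is its maximum followed by the descending sort of the rest
theorem pvSortedDesc_max_cons {xs : List Int} {m : Int}
    (hm : PySem.List.max? xs (fun v => v) = some m) :
    PySem.List.sorted xs (fun v => v) true = m :: PySem.List.sorted (xs.erase m) (fun v => v) true := by
  have hmem : m ∈ xs := PySem.List.max?_mem hm
  have hmax : ∀ y ∈ xs, y ≤ m := fun y hy => PySem.List.max?_isMax hm y hy
  have hperm : List.Perm (PySem.List.sorted xs (fun v => v) true)
      (m :: PySem.List.sorted (xs.erase m) (fun v => v) true) :=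
    ((PySem.List.sorted_perm xs _ true).trans (List.perm_cons_erase hmem)).trans
      (List.Perm.cons m (PySem.List.sorted_perm _ _ true).symm)
  have hs1 : List.Pairwise (fun a b : Int => b ≤ a) (PySem.List.sorted xs (fun v => v) true) :=
    PySem.List.sorted_pairwise_rev (xs := xs) (key := fun v => v)
  have hs2 : List.Pairwise (fun a b : Int => b ≤ a)
      (m :: PySem.List.sorted (xs.erase m) (fun v => v) true) := by
    refine List.Pairwise.cons ?_ ?_
    · intro y hy
      exact hmax y (List.mem_of_mem_erase ((PySem.List.mem_sorted _ _ _ _).1 hy))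
    · exact PySem.List.sorted_pairwise_rev (xs := xs.erase m) (key := fun v => v)
  exact List.Perm.eq_of_pairwise (fun a b _ _ h1 h2 => le_antisymm h2 h1) hs1 hs2 hperm

theorem pvMainEq (capacity : Int) (ingots : List Int) (max_weight : Int) :
    find_max_weight capacity ingots max_weight = find_max_weight_alt capacity ingots max_weight := by
  induction hn : ingots.length using Nat.strong_induction_on generalizing ingots max_weight with
  | _ n ih =>
    cases hm : PySem.List.max? ingots (fun v => v) with
    | none =>
      have hnil : ingots = [] := (PySem.List.max?_eq_none_iff ingots (fun v => v)).1 hm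
      subst hnil
      simp [find_max_weight, find_max_weight_alt, hm, PySem.List.sorted]
    | some heaviest =>
      have hmem : heaviest ∈ ingots := PySem.List.max?_mem hm
      have hrem : PySem.List.remove? ingots heaviest = some (ingots.erase heaviest) :=
        PySem.List.remove?_eq_some_erase ingots heaviest hmem
      have hlen : (ingots.erase heaviest).length < n := by
        have := pvRemove_len hrem; omega
      rw [find_max_weight, hm]
      split
      next hr => simp at hr
      next v hr =>
        injection hr with hv
        subst hv
        split
        all_goals
          first
          | (next hc =>
              split
              next hr2 => rw [hrem] at hr2; simp at hr2
              next rest hr2 =>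
                rw [hrem] at hr2
                injection hr2 with hr2
                subst hr2
                rw [ih _ hlen _ _ rfl]
                unfold find_max_weight_alt
                rw [pvSortedDesc_max_cons hm, List.foldl_cons]
                simp only [hc, if_pos, if_neg, not_false_iff])

-- ===== VERDICT (by name: the statement is the Claim_ definition above) =====
theorem find_max_weight_spec : Claim_equal_find_max_weight := by
  intro capacity ingots max_weight _
  exact pvMainEq capacity ingots max_weight
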